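-- pv_equiv track=rewrite | github.com/aryannzzz/ml-audit-env-paper | inference.py | _loop_break_action
-- ===== SOURCE A (Python) =====
-- from typing import Any, Dict, List, Optional, Set, Tuple
--
-- ACTION_PRIORITY = [
--     "dataset_info",
--     "preprocessing",
--     "split_config",
--     "model_config",
--     "validation_strategy",
--     "eval_report",
--     "run_history",
--     "experiment_notes",
--     "training_logs",
--     "feature_engineering",
-- ]
--
-- def _loop_break_action(
--     observation: Dict[str, Any],
--     repeated_artifact: str,
--     flagged: Optional[Set[str]] = None,
-- ) -> Dict[str, str]:
--     available = [str(a) for a in (observation.get("available_artifacts") or [])]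
--     inspected = {str(a) for a in (observation.get("inspected_artifacts") or [])}
--
--     for artifact in ACTION_PRIORITY:
--         if artifact in available and artifact not in inspected and artifact != repeated_artifact:
--             return {"type": "inspect", "artifact": artifact}
--
--     for artifact in available:
--         if artifact not in inspected and artifact != repeated_artifact:
--             return {"type": "inspect", "artifact": artifact}
--
--     verdict = _smart_verdict(flagged)
--     return {
--         "type": "submit",
--         "verdict": verdict,
--         "summary": f"Loop guard: all artifacts inspected. Flags: {sorted(flagged) if flagged else 'none'}",
--     }
--
-- def _smart_verdict(flagged: Optional[Set[str]]) -> str: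
--     """Determine submit verdict from flagged violation types."""
--     if not flagged:
--         return "pass"
--     reject_types = {"V1", "V2", "V3", "V4", "V7", "V8"}
--     revise_types = {"V5", "V6"}
--     if flagged & reject_types:
--         return "reject"
--     if flagged & revise_types:
--         return "revise"
--     return "pass"
-- ===== SOURCE B (Python) =====
-- from typing import Any, Dict, List, Optional, Set
--
-- ACTION_PRIORITY = [
--     "dataset_info",
--     "preprocessing",
--     "split_config",
--     "model_config",
--     "validation_strategy",
--     "eval_report",
--     "run_history",
--     "experiment_notes",
--     "training_logs",
--     "feature_engineering",
-- ]
--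
--
-- def _rank(artifact: str) -> int:
--     i = 0
--     for name in ACTION_PRIORITY:
--         if name == artifact:
--             return i
--         i += 1
--     return i
--
--
-- def _verdict(flagged: Optional[Set[str]]) -> str:
--     if not flagged:
--         return "pass"
--     if any(f in {"V1", "V2", "V3", "V4", "V7", "V8"} for f in flagged):
--         return "reject"
--     if any(f in {"V5", "V6"} for f in flagged):
--         return "revise"
--     return "pass"
--
--
-- def _loop_break_action(
--     observation: Dict[str, Any],
--     repeated_artifact: str,
--     flagged: Optional[Set[str]] = None,
-- ) -> Dict[str, str]:
--     available = [str(a) for a in (observation.get("available_artifacts") or [])]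
--     inspected = {str(a) for a in (observation.get("inspected_artifacts") or [])}
--
--     # one filtering pass, then keep the first candidate of minimal priority rank
--     eligible = [a for a in available if a not in inspected and a != repeated_artifact]
--     if eligible:
--         best = eligible[0]
--         for a in eligible[1:]:
--             if _rank(a) < _rank(best):
--                 best = a
--         return {"type": "inspect", "artifact": best}
--
--     return {
--         "type": "submit",
--         "verdict": _verdict(flagged),
--         "summary": f"Loop guard: all artifacts inspected. Flags: {sorted(flagged) if flagged else 'none'}",
--     }
-- ===== Notes on version B (the rewrite author's own statement) =====
-- stated objective: alternative
-- what changed: A's two sequential scans (first over ACTION_PRIORITY testing availability, then over available) are replaced by a single filter pass over available followed by one minimum-by-priority-rank selection over the eligible candidates; the submit branch is unchanged and the verdict is computed with any() instead of set intersections.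
import Mathlib
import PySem

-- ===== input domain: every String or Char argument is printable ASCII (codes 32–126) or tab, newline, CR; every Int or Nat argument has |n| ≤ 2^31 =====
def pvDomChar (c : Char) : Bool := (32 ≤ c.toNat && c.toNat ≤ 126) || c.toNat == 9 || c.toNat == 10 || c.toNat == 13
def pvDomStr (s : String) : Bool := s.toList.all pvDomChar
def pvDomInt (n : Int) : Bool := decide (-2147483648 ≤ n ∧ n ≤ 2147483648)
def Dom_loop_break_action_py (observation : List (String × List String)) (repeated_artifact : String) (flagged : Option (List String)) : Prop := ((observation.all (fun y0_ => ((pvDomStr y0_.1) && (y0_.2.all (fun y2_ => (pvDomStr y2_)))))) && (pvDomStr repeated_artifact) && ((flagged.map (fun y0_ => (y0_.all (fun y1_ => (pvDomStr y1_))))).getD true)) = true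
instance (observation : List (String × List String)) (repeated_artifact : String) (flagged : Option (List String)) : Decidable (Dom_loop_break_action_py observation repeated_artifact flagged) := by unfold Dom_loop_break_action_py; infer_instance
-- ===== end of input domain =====

-- B replaces A's two sequential scans (priority list, then available list) by one filter pass
-- plus a single minimum-by-rank selection; objective: alternative single-pass selection, same cost class.

-- == shared context: the module constant and the argument decoding both Pythons share ==

def actionPriority : List String :=
  ["dataset_info", "preprocessing", "split_config", "model_config", "validation_strategy",
   "eval_report", "run_history", "experiment_notes", "training_logs", "feature_engineering"]

-- Python repr(s) for strings over the printable-ASCII/tab/newline/CR domain (hand port, exact there):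
-- quote is ' unless s contains ' and no "; escapes \\, the quote, \t, \n, \r.
def pyCharEsc (q : Char) (c : Char) : List Char :=
  if c = '\\' then ['\\', '\\']
  else if c = q then ['\\', q]
  else if c = '\t' then ['\\', 't']
  else if c = '\n' then ['\\', 'n']
  else if c = '\r' then ['\\', 'r']
  else [c]

def pyStrRepr (s : String) : List Char :=
  let cs := s.toList
  let q : Char := if cs.contains '\'' && !(cs.contains '"') then '"' else '\''
  q :: cs.flatMap (pyCharEsc q) ++ [q]

-- str(list_of_str): '[' ++ ', '-separated reprs ++ ']' (exact on the same domain)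
def pyStrListReprBody : List String → List Char
  | [] => []
  | [x] => pyStrRepr x
  | x :: y :: t => pyStrRepr x ++ [',', ' '] ++ pyStrListReprBody (y :: t)

-- the f-string both Pythons build verbatim in their submit branch
def loopGuardSummary (flagged : Option (List String)) : String :=
  let tail : List Char :=
    match flagged with
    | none => "none".toList
    | some f => if f = [] then "none".toList
                else '[' :: pyStrListReprBody (PySem.List.sorted f (fun x => x) false) ++ [']']
  String.ofList ("Loop guard: all artifacts inspected. Flags: ".toList ++ tail)

-- observation.get(k) or []  (get = first match; 'or []' sends None and [] alike to [])
def getListField (observation : List (String × List String)) (k : String) : List String :=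
  ((observation.find? (fun kv => kv.1 == k)).map (fun kv => kv.2)).getD []

-- ===== PORT A =====

def smartVerdictA (flagged : Option (List String)) : String :=
  match flagged with
  | none => "pass"                    -- 'if not flagged'
  | some f =>
    if f = [] then "pass"
    else
      let rejectTypes := PySem.Set.ofList ["V1", "V2", "V3", "V4", "V7", "V8"]
      let reviseTypes := PySem.Set.ofList ["V5", "V6"]
      if PySem.Set.inter (PySem.Set.ofList f) rejectTypes ≠ [] then "reject"
      else if PySem.Set.inter (PySem.Set.ofList f) reviseTypes ≠ [] then "revise"
      else "pass"

def loop_break_action_py (observation : List (String × List String)) (repeated_artifact : String) (flagged : Option (List String)) : List (String × String) :=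
  let available := getListField observation "available_artifacts"
  let inspected := PySem.Set.ofList (getListField observation "inspected_artifacts")
  -- first for-loop with return: first ACTION_PRIORITY element that is available and eligible
  match actionPriority.find? (fun artifact =>
      available.contains artifact && !(PySem.Set.contains inspected artifact) && artifact != repeated_artifact) with
  | some artifact => [("type", "inspect"), ("artifact", artifact)]
  | none =>
    -- second for-loop with return: first available eligible artifact
    match available.find? (fun artifact =>
        !(PySem.Set.contains inspected artifact) && artifact != repeated_artifact) with
    | some artifact => [("type", "inspect"), ("artifact", artifact)]
    | none =>
      [("type", "submit"), ("verdict", smartVerdictA flagged), ("summary", loopGuardSummary flagged)]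

-- ===== PORT B =====

-- Source B's _rank: linear scan of ACTION_PRIORITY, index on hit, length when absent
def rankIn : List String → String → Nat
  | [], _ => 0
  | name :: rest, a => if name == a then 0 else rankIn rest a + 1

def verdictB (flagged : Option (List String)) : String :=
  match flagged with
  | none => "pass"
  | some f =>
    if f = [] then "pass"
    else if f.any (fun x => PySem.Set.contains (PySem.Set.ofList ["V1", "V2", "V3", "V4", "V7", "V8"]) x) then "reject"
    else if f.any (fun x => PySem.Set.contains (PySem.Set.ofList ["V5", "V6"]) x) then "revise"
    else "pass"

def loop_break_action_py_alt (observation : List (String × List String)) (repeated_artifact : String) (flagged : Option (List String)) : List (String × String) :=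
  let available := getListField observation "available_artifacts"
  let inspected := PySem.Set.ofList (getListField observation "inspected_artifacts")
  let eligible := available.filter (fun a => !(PySem.Set.contains inspected a) && a != repeated_artifact)
  match eligible with
  | best0 :: rest =>
    let best := rest.foldl (fun best a =>
      if rankIn actionPriority a < rankIn actionPriority best then a else best) best0
    [("type", "inspect"), ("artifact", best)]
  | [] =>
    [("type", "submit"), ("verdict", verdictB flagged), ("summary", loopGuardSummary flagged)]

-- ===== PRECONDITION & SPEC =====
def Spec_loop_break_action_py (observation : List (String × List String)) (repeated_artifact : String) (flagged : Option (List String)) (out : List (String × String)) : Prop := out = loop_break_action_py_alt observation repeated_artifact flagged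
instance (observation : List (String × List String)) (repeated_artifact : String) (flagged : Option (List String)) (out : List (String × String)) : Decidable (Spec_loop_break_action_py observation repeated_artifact flagged out) := by unfold Spec_loop_break_action_py; infer_instance

-- ===== CLAIM (what is proved, stated in full; the proofs are below) =====
def Claim_equal_loop_break_action_py : Prop := ∀ (observation : List (String × List String)) (repeated_artifact : String) (flagged : Option (List String)), Dom_loop_break_action_py observation repeated_artifact flagged → Spec_loop_break_action_py observation repeated_artifact flagged (loop_break_action_py observation repeated_artifact flagged)

-- ===== LEMMAS AND PROOFS =====

-- the two verdict helpers agree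
theorem inter_ne_nil_iff (f R : List String) :
    PySem.Set.inter (PySem.Set.ofList f) (PySem.Set.ofList R) ≠ [] ↔ ∃ x ∈ f, x ∈ R := by
  constructor
  · intro hne
    rcases List.exists_mem_of_ne_nil _ hne with ⟨y, hy⟩
    rw [PySem.Set.mem_inter] at hy
    exact ⟨y, (PySem.Set.mem_ofList _ _).mp hy.1, (PySem.Set.mem_ofList _ _).mp hy.2⟩
  · rintro ⟨x, hxf, hxR⟩
    exact List.ne_nil_of_mem ((PySem.Set.mem_inter _ _ _).mpr
      ⟨(PySem.Set.mem_ofList _ _).mpr hxf, (PySem.Set.mem_ofList _ _).mpr hxR⟩)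

theorem any_contains_iff (f R : List String) :
    (f.any (fun x => PySem.Set.contains (PySem.Set.ofList R) x) = true) ↔ ∃ x ∈ f, x ∈ R := by
  simp [List.any_eq_true, PySem.Set.mem_ofList]

theorem verdict_eq (flagged : Option (List String)) : smartVerdictA flagged = verdictB flagged := by
  cases flagged with
  | none => rfl
  | some f =>
    by_cases hf : f = []
    · simp [smartVerdictA, verdictB, hf]
    · simp only [smartVerdictA, verdictB, if_neg hf]
      by_cases h1 : ∃ x ∈ f, x ∈ (["V1", "V2", "V3", "V4", "V7", "V8"] : List String)
      · rw [if_pos ((inter_ne_nil_iff _ _).mpr h1), if_pos ((any_contains_iff _ _).mpr h1)]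
      · rw [if_neg (fun hc => h1 ((inter_ne_nil_iff _ _).mp hc)),
            if_neg (fun hc => h1 ((any_contains_iff _ _).mp hc))]
        by_cases h2 : ∃ x ∈ f, x ∈ (["V5", "V6"] : List String)
        · rw [if_pos ((inter_ne_nil_iff _ _).mpr h2), if_pos ((any_contains_iff _ _).mpr h2)]
        · rw [if_neg (fun hc => h2 ((inter_ne_nil_iff _ _).mp hc)),
              if_neg (fun hc => h2 ((any_contains_iff _ _).mp hc))]

-- find? = head of filter
theorem find?_eq_head?_filter {α : Type} (p : α → Bool) (l : List α) :
    l.find? p = (l.filter p).head? := by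
  induction l with
  | nil => rfl
  | cons x t ih =>
    by_cases h : p x = true
    · rw [List.find?_cons_of_pos h, List.filter_cons_of_pos h]; rfl
    · rw [List.find?_cons_of_neg h, List.filter_cons_of_neg h, ih]

-- one fold step preserves the first-priority-in characterisation (parametric in the priority list)
theorem step_find (L : List String) (h x : String) (t' : List String) :
    (L.find? (fun a => decide (a ∈ ((if rankIn L x < rankIn L h then x else h) :: t')))).getD
        (if rankIn L x < rankIn L h then x else h)
      = (L.find? (fun a => decide (a ∈ h :: x :: t'))).getD h := by
  induction L generalizing h with
  | nil => simp [rankIn]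
  | cons c L ih =>
    by_cases hh : c = h
    · subst hh
      have h0 : rankIn (c :: L) c = 0 := by simp [rankIn]
      rw [h0]
      simp only [Nat.not_lt_zero, if_false]
      rw [List.find?_cons_of_pos (by simp), List.find?_cons_of_pos (by simp)]
    · by_cases hx : c = x
      · subst hx
        have h0 : rankIn (c :: L) c = 0 := by simp [rankIn]
        have hr : rankIn (c :: L) h = rankIn L h + 1 := by simp [rankIn, hh]
        rw [h0, hr, if_pos (Nat.succ_pos _)]
        rw [List.find?_cons_of_pos (by simp), List.find?_cons_of_pos (by simp)]
        rfl
      · have hrx : rankIn (c :: L) x = rankIn L x + 1 := by simp [rankIn, hx]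
        have hrh : rankIn (c :: L) h = rankIn L h + 1 := by simp [rankIn, hh]
        have hs : (if rankIn (c :: L) x < rankIn (c :: L) h then x else h)
            = (if rankIn L x < rankIn L h then x else h) := by
          rw [hrx, hrh]
          simp
        rw [hs]
        have hcs : c ≠ (if rankIn L x < rankIn L h then x else h) := by
          split
          · exact hx
          · exact hh
        by_cases hct : c ∈ t'
        · rw [List.find?_cons_of_pos (by simp [hct]), List.find?_cons_of_pos (by simp [hct])]
          rfl
        · rw [List.find?_cons_of_neg (by simp [hct, hcs]),
              List.find?_cons_of_neg (by simp [hct, hh, hx])]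
          exact ih h

-- the fold computes the first priority-list element present, defaulting to the head
theorem foldl_min_rank (L : List String) (t : List String) (h : String) :
    t.foldl (fun best a => if rankIn L a < rankIn L best then a else best) h
      = (L.find? (fun a => decide (a ∈ h :: t))).getD h := by
  induction t generalizing h with
  | nil =>
    cases hf : L.find? (fun a => decide (a ∈ [h])) with
    | none => rfl
    | some a =>
      have := List.find?_some hf
      simp only [List.mem_singleton, decide_eq_true_eq] at this
      simp [this]
  | cons x t' ih =>
    rw [List.foldl_cons, ih, step_find]

-- ===== VERDICT (by name: the statement is the Claim_ definition above) =====
theorem loop_break_action_py_spec : Claim_equal_loop_break_action_py := by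
  intro observation repeated_artifact flagged _
  unfold Spec_loop_break_action_py loop_break_action_py loop_break_action_py_alt
  dsimp only
  generalize getListField observation "available_artifacts" = available
  generalize PySem.Set.ofList (getListField observation "inspected_artifacts") = inspected
  have hfind1 : actionPriority.find? (fun artifact =>
        available.contains artifact && !(PySem.Set.contains inspected artifact) && artifact != repeated_artifact)
      = actionPriority.find? (fun a =>
        decide (a ∈ available.filter (fun a => !(PySem.Set.contains inspected a) && a != repeated_artifact))) := by
    congr 1
    funext a
    by_cases h : a = repeated_artifact
    · simp [List.mem_filter, List.contains_eq_mem, bne, h]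
    · have hb : (a == repeated_artifact) = false := beq_eq_false_iff_ne.mpr h
      simp [List.mem_filter, List.contains_eq_mem, bne, hb]
  have hfind2 : available.find? (fun artifact =>
        !(PySem.Set.contains inspected artifact) && artifact != repeated_artifact)
      = (available.filter (fun a => !(PySem.Set.contains inspected a) && a != repeated_artifact)).head? :=
    find?_eq_head?_filter _ _
  rw [hfind1, hfind2]
  cases hE : available.filter (fun a => !(PySem.Set.contains inspected a) && a != repeated_artifact) with
  | nil =>
    rw [show List.find? (fun a : String => decide (a ∈ ([] : List String))) actionPriority = none from rfl]
    simp [verdict_eq]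
  | cons best0 rest =>
    dsimp only
    rw [foldl_min_rank]
    cases actionPriority.find? (fun a => decide (a ∈ best0 :: rest)) with
    | some a => simp
    | none => simp
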